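-- pv_equiv track=rewrite | github.com/bonshot/BotShot | src/main/juegos/vistas/chinchon/vista_chinchon.py | d_num
-- ===== SOURCE A (Python) =====
-- from typing import TYPE_CHECKING, Generator, Optional, TypeAlias, Union
--
-- def d_num(num: int) -> Generator[int, None, None]:
--     """
--     Va cediendo valores por los que calcular translaciones.
--     """
--
--     for i in range(num):
--         mitad = num // 2
--         cand = i - mitad
--         if (cand >= 0) and (num % 2 == 0):
--             yield cand + 1
--         else:
--             yield cand
-- ===== SOURCE B (Python) =====
-- def d_num(num):
--     """Same offsets via two contiguous range sweeps instead of a per-index conditional."""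
--     mitad = num // 2
--     if num % 2:
--         yield from range(-mitad, mitad + 1)
--     else:
--         yield from range(-mitad, 0)
--         yield from range(1, mitad + 1)
-- ===== Notes on version B (the rewrite author's own statement) =====
-- stated objective: simpler
-- what changed: B branches once on parity and yields the offsets as one or two contiguous range sweeps (range(-mitad, mitad+1) for odd, range(-mitad,0)+range(1,mitad+1) for even), eliminating A's index loop with its per-iteration division, subtraction and conditional.
import Mathlib
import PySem

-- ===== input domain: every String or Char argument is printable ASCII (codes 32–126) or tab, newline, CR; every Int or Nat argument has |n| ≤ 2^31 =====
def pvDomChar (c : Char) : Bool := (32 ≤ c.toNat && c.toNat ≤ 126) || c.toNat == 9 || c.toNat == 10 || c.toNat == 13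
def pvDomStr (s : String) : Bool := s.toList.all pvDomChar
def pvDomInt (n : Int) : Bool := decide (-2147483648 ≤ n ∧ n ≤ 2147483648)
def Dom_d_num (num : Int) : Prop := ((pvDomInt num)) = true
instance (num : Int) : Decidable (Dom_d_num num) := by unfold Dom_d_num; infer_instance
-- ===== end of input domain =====

-- B replaces A's index loop with a per-element conditional by a single parity branch
-- yielding one or two contiguous range sweeps (objective: simpler).

-- ===== PORT A =====
-- the loop body of A: mitad = num // 2; cand = i - mitad; yield cand+1 or cand
def pvStep (mitad r i : Int) : Int :=
  let cand := i - mitad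
  if cand ≥ 0 ∧ r = 0 then cand + 1 else cand

def d_num (num : Int) : List Int :=
  (PySem.List.pyRange 0 num 1).map
    (fun i => pvStep (PySem.Int.floordiv num 2) (PySem.Int.mod num 2) i)

-- ===== PORT B =====
def d_num_alt (num : Int) : List Int :=
  let mitad := PySem.Int.floordiv num 2
  if PySem.Int.mod num 2 ≠ 0 then
    PySem.List.pyRange (-mitad) (mitad + 1) 1
  else
    PySem.List.pyRange (-mitad) 0 1 ++ PySem.List.pyRange 1 (mitad + 1) 1

-- ===== PRECONDITION & SPEC =====
def Spec_d_num (num : Int) (out : List Int) : Prop := out = d_num_alt num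
instance (num : Int) (out : List Int) : Decidable (Spec_d_num num out) := by unfold Spec_d_num; infer_instance

-- ===== CLAIM (what is proved, stated in full; the proofs are below) =====
def Claim_equal_d_num : Prop := ∀ (num : Int), Dom_d_num num → Spec_d_num num (d_num num)

-- ===== LEMMAS AND PROOFS =====

-- shifting every element of a step-1 range shifts its endpoints
theorem pv_map_add_pyRange (a b c : Int) :
    (PySem.List.pyRange a b 1).map (fun i => i + c) = PySem.List.pyRange (a + c) (b + c) 1 := by
  rw [PySem.List.pyRange_one, PySem.List.pyRange_one]
  have hlen : (b + c - (a + c)).toNat = (b - a).toNat := by omega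
  rw [hlen, List.map_map]
  exact List.map_congr_left (fun k _ => by simp only [Function.comp_apply]; ring)

-- ===== VERDICT (by name: the statement is the Claim_ definition above) =====
theorem d_num_spec : Claim_equal_d_num := by
  intro num _
  unfold Spec_d_num d_num d_num_alt
  have hm : PySem.Int.floordiv num 2 = num / 2 := PySem.Int.floordiv_eq_ediv_of_pos (by norm_num)
  have hmod : PySem.Int.mod num 2 = num % 2 := PySem.Int.mod_eq_emod_of_pos (by norm_num)
  rw [hm, hmod]
  set m : Int := num / 2 with hm2
  by_cases hneg : num < 0
  · -- num < 0 : A's range is empty and so are both of B's sweeps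
    have hmneg : m ≤ -1 := by omega
    rw [PySem.List.pyRange_one_eq_nil (show num ≤ 0 by omega)]
    rcases Int.emod_two_eq_zero_or_one num with he | ho
    · simp only [he, ne_eq, not_true_eq_false, if_false]
      rw [PySem.List.pyRange_one_eq_nil (show (0 : Int) ≤ -m by omega),
          PySem.List.pyRange_one_eq_nil (show (m : Int) + 1 ≤ 1 by omega)]
      simp
    · simp only [ho, ne_eq, one_ne_zero, not_false_eq_true, if_true]
      rw [PySem.List.pyRange_one_eq_nil (show (m : Int) + 1 ≤ -m by omega)]
      simp
  · rw [Int.not_lt] at hneg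
    rcases Int.emod_two_eq_zero_or_one num with he | ho
    · -- even : num = 2 * m, candidates ≥ mitad get shifted up by one
      have hnum : num = 2 * m := by omega
      simp only [he, ne_eq, not_true_eq_false, if_false]
      rw [PySem.List.pyRange_one_append 0 m num (by omega) (by omega), List.map_append]
      congr 1
      · have h1 : (PySem.List.pyRange 0 m 1).map (fun i => pvStep m 0 i)
            = (PySem.List.pyRange 0 m 1).map (fun i => i + (-m)) := by
          refine List.map_congr_left (fun i hi => ?_)
          rw [PySem.List.mem_pyRange_one] at hi
          show (if i - m ≥ 0 ∧ (0:Int) = 0 then i - m + 1 else i - m) = i + (-m)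
          rw [if_neg (by omega)]; ring
        rw [h1, pv_map_add_pyRange]
        congr 1 <;> ring
      · have h2 : (PySem.List.pyRange m num 1).map (fun i => pvStep m 0 i)
            = (PySem.List.pyRange m num 1).map (fun i => i + (1 - m)) := by
          refine List.map_congr_left (fun i hi => ?_)
          rw [PySem.List.mem_pyRange_one] at hi
          show (if i - m ≥ 0 ∧ (0:Int) = 0 then i - m + 1 else i - m) = i + (1 - m)
          rw [if_pos (by omega)]; ring
        rw [h2, pv_map_add_pyRange]
        congr 1 <;> omega
    · -- odd : num = 2 * m + 1, every candidate is yielded as is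
      have hnum : num = 2 * m + 1 := by omega
      simp only [ho, ne_eq, one_ne_zero, not_false_eq_true, if_true]
      have h1 : (PySem.List.pyRange 0 num 1).map (fun i => pvStep m 1 i)
          = (PySem.List.pyRange 0 num 1).map (fun i => i + (-m)) := by
        refine List.map_congr_left (fun i _ => ?_)
        show (if i - m ≥ 0 ∧ (1:Int) = 0 then i - m + 1 else i - m) = i + (-m)
        rw [if_neg (by omega)]; ring
      rw [h1, pv_map_add_pyRange]
      congr 1 <;> omega
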